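-- pv_equiv track=rewrite | github.com/Jw705/Algorithm | 프로그래머스/2/154540. 무인도 여행/무인도 여행.py | solution
-- ===== SOURCE A (Python) =====
-- def solution(maps):
--     answer = []
--     visited=[ [0 for _ in range(len(maps[0]))] for _ in range(len(maps)) ]
--     for i in range(len(maps)):
--         for j in range(len(maps[0])):
--             if maps[i][j] != 'X' and not visited[i][j]:
--                 visited[i][j]=True
--                 answer.append(dfs(maps,[i,j],visited))
--
--     if answer == []:
--         answer.append(-1)
--     answer.sort()
--     return answer
--
-- def dfs(maps, v, visited):
--     x,y = v
--     area = int(maps[x][y])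
--
--     direction = [[-1,0],[1,0],[0,-1],[0,1]]
--     for direct in direction:
--         dx,dy = direct
--         nx = x+dx
--         ny = y+dy
--
--         if 0 <= nx < len(maps) and 0 <= ny < len(maps[0]):
--             if maps[nx][ny] != 'X' and not visited[nx][ny] :
--                 visited[nx][ny] = True
--                 area += dfs(maps, [nx,ny], visited)
--
--     return area
-- ===== SOURCE B (Python) =====
-- def solution(maps):
--     h = len(maps)
--     w = len(maps[0])
--     visited = [[False] * w for _ in range(h)]
--     answer = []
--     for i in range(h):
--         for j in range(w):
--             if maps[i][j] != 'X' and not visited[i][j]: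
--                 visited[i][j] = True
--                 area = 0
--                 stack = [(i, j)]
--                 while stack:
--                     x, y = stack.pop()
--                     area += int(maps[x][y])
--                     for nx, ny in ((x - 1, y), (x + 1, y), (x, y - 1), (x, y + 1)):
--                         if 0 <= nx < h and 0 <= ny < w and maps[nx][ny] != 'X' and not visited[nx][ny]:
--                             visited[nx][ny] = True
--                             stack.append((nx, ny))
--                 answer.append(area)
--     if not answer:
--         answer.append(-1)
--     answer.sort()
--     return answer
-- ===== Notes on version B (the rewrite author's own statement) =====
-- stated objective: idiomatic
-- what changed: The recursive dfs helper is replaced by an iterative stack-based flood fill (mark at push time) inside the same outer scan; no recursion, no helper function.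
-- outside the precondition, e.g. on solution([]): A returns [-1], B raises IndexError
import Mathlib
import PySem

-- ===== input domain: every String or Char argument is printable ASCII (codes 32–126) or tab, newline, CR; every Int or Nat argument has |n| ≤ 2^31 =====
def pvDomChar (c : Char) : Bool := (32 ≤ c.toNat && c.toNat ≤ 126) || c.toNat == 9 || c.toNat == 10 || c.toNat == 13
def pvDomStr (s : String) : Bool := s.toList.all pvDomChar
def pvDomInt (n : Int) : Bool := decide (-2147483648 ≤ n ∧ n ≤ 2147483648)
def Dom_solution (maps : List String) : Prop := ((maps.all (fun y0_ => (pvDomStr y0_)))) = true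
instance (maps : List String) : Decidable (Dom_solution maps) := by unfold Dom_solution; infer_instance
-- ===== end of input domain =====

-- B replaces A's recursive dfs by an iterative stack flood fill (same outer scan, same answer);
-- A mutates only its local visited grid, so no caller-visible side effects are at stake.

-- ===== PORT A =====
-- shared representation helpers: the grid as List (List Char), visited as a Finset of (row, col)
abbrev Cell := Int × Int

def cellOf (i j : ℕ) : Cell := ((i : Int), (j : Int))

def chAt (g : List (List Char)) (x y : Int) : Char := (g.getD x.toNat []).getD y.toNat 'X'
-- maps[x][y]; only evaluated with proven in-range non-negative indices, where it is exact

def dval (c : Char) : Int := (c.toNat : Int) - 48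
-- int(maps[x][y]); exact on digit characters, the only ones reaching it under Pre_solution

abbrev okc (g : List (List Char)) (H W : Int) (c : Cell) : Prop :=
  0 ≤ c.1 ∧ c.1 < H ∧ 0 ≤ c.2 ∧ c.2 < W ∧ chAt g c.1 c.2 ≠ 'X'
-- the combined bounds + land test both Pythons perform on a neighbour

def nbrs (v : Cell) : List Cell := [(v.1 - 1, v.2), (v.1 + 1, v.2), (v.1, v.2 - 1), (v.1, v.2 + 1)]

def cellsF (H W : Int) : Finset Cell :=
  ((List.range H.toNat).flatMap (fun i => (List.range W.toNat).map (fun j => cellOf i j))).toFinset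
-- the finite board, used only for termination measures and in proofs

lemma okc_mem_cellsF {g : List (List Char)} {H W : Int} {c : Cell}
    (h : okc g H W c) : c ∈ cellsF H W := by
  obtain ⟨h1, h2, h3, h4, _⟩ := h
  simp only [cellsF, List.mem_toFinset, List.mem_flatMap, List.mem_map, List.mem_range]
  refine ⟨c.1.toNat, by omega, c.2.toNat, by omega, ?_⟩
  simp only [cellOf]
  rw [Int.toNat_of_nonneg h1, Int.toNat_of_nonneg h3]

lemma card_sdiff_lt {cells V X : Finset Cell} {n : Cell}
    (hVX : V ⊆ X) (hn : n ∈ cells) (hnX : n ∉ X) :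
    (cells \ insert n X).card < (cells \ V).card := by
  apply Finset.card_lt_card
  constructor
  · intro x hx
    simp only [Finset.mem_sdiff, Finset.mem_insert] at hx ⊢
    exact ⟨hx.1, fun hxV => hx.2 (Or.inr (hVX hxV))⟩
  · intro hsub
    have hnV : n ∉ V := fun h => hnX (hVX h)
    have : n ∈ cells \ insert n X := hsub (by simp [Finset.mem_sdiff, hn, hnV])
    simp at this

-- recursive dfs of A; the '∪' with the recursive result is a no-op (the result always contains
-- 'insert n vis') kept so the visited set grows syntactically, which the termination proof needs
mutual
def dfsA (g : List (List Char)) (H W : Int) (v : Cell) (vis : Finset Cell) : Int × Finset Cell :=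
  dfsNbrs g H W v (nbrs v) vis (dval (chAt g v.1 v.2))
termination_by ((cellsF H W \ vis).card, 5)
decreasing_by
  exact Prod.Lex.right _ (by simp [nbrs])

def dfsNbrs (g : List (List Char)) (H W : Int) (v : Cell) (ns : List Cell) (vis : Finset Cell)
    (a : Int) : Int × Finset Cell :=
  match ns with
  | [] => (a, vis)
  | n :: rest =>
    if _h : okc g H W n ∧ n ∉ vis then
      let r := dfsA g H W n (insert n vis)
      dfsNbrs g H W v rest (insert n vis ∪ r.2) (a + r.1)
    else
      dfsNbrs g H W v rest vis a
termination_by ((cellsF H W \ vis).card, ns.length)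
decreasing_by
  · exact Prod.Lex.left _ _ (card_sdiff_lt (Finset.Subset.refl _) (okc_mem_cellsF _h.1) _h.2)
  · have hsub : vis ⊆ insert n vis ∪ r.2 :=
      fun x hx => Finset.mem_union_left _ (Finset.mem_insert_of_mem hx)
    have hle : (cellsF H W \ (insert n vis ∪ r.2)).card ≤ (cellsF H W \ vis).card :=
      Finset.card_le_card (Finset.sdiff_subset_sdiff (Finset.Subset.refl _) hsub)
    rcases lt_or_eq_of_le hle with hlt | heq
    · exact Prod.Lex.left _ _ hlt
    · rw [heq]; exact Prod.Lex.right _ (Nat.lt_succ_self _)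
  · exact Prod.Lex.right _ (Nat.lt_succ_self _)
end

def stepA (g : List (List Char)) (H W : Int) (st : List Int × Finset Cell) (c : Cell) :
    List Int × Finset Cell :=
  if chAt g c.1 c.2 ≠ 'X' ∧ c ∉ st.2 then
    let d := dfsA g H W c (insert c st.2)
    (st.1 ++ [d.1], d.2)
  else st

def solution (maps : List String) : List Int :=
  let g := maps.map String.toList
  let r := (List.range maps.length).foldl
    (fun st i => (List.range (maps.headD "").length).foldl
      (fun st2 j => stepA g (maps.length : Int) ((maps.headD "").length : Int) st2 (cellOf i j)) st)
    (([] : List Int), (∅ : Finset Cell))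
  PySem.List.sorted (if r.1 = [] then [-1] else r.1) (fun x => x) false

-- ===== PORT B =====
-- iterative flood fill: pop a cell, add its value, push unvisited in-bounds land neighbours,
-- marking them visited at push time (stack top at the list head)
def pushN (g : List (List Char)) (H W : Int) (ns : List Cell) (st : List Cell × Finset Cell) :
    List Cell × Finset Cell :=
  ns.foldl (fun p m => if okc g H W m ∧ m ∉ p.2 then (m :: p.1, insert m p.2) else p) st

lemma pushN_card (g : List (List Char)) (H W : Int) :
    ∀ (ns : List Cell) (st : List Cell × Finset Cell),
      (cellsF H W \ (pushN g H W ns st).2).card + (pushN g H W ns st).1.length ≤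
        (cellsF H W \ st.2).card + st.1.length := by
  intro ns
  induction ns with
  | nil => intro st; simp [pushN]
  | cons m rest ih =>
    intro st
    simp only [pushN, List.foldl_cons]
    by_cases h : okc g H W m ∧ m ∉ st.2
    · rw [if_pos h]
      refine le_trans (ih _) ?_
      have := card_sdiff_lt (cells := cellsF H W) (Finset.Subset.refl st.2)
        (okc_mem_cellsF h.1) h.2
      simp only [List.length_cons]
      omega
    · rw [if_neg h]; exact ih st

def loopB (g : List (List Char)) (H W : Int) (stack : List Cell) (vis : Finset Cell) (a : Int) :
    Int × Finset Cell :=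
  match stack with
  | [] => (a, vis)
  | c :: rest =>
    let p := pushN g H W (nbrs c) (rest, vis)
    loopB g H W p.1 p.2 (a + dval (chAt g c.1 c.2))
termination_by (cellsF H W \ vis).card + stack.length
decreasing_by
  have := pushN_card g H W (nbrs c) (rest, vis)
  simp only [List.length_cons] at this ⊢
  omega

def stepB (g : List (List Char)) (H W : Int) (st : List Int × Finset Cell) (c : Cell) :
    List Int × Finset Cell :=
  if chAt g c.1 c.2 ≠ 'X' ∧ c ∉ st.2 then
    let d := loopB g H W [c] (insert c st.2) 0
    (st.1 ++ [d.1], d.2)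
  else st

def solution_alt (maps : List String) : List Int :=
  let g := maps.map String.toList
  let idxs := (List.range maps.length).flatMap
    (fun i => (List.range (maps.headD "").length).map (fun j => cellOf i j))
  let r := idxs.foldl (fun st c => stepB g (maps.length : Int) ((maps.headD "").length : Int) st c)
    (([] : List Int), (∅ : Finset Cell))
  PySem.List.sorted (if r.1 = [] then [-1] else r.1) (fun x => x) false

-- ===== PRECONDITION & SPEC =====
-- Pre_ excludes the inputs where A raises — a row shorter than the first row (IndexError) or a
-- scanned cell that is neither 'X' nor a digit (int() → ValueError); B raises there too — and the
-- empty list, where A's [-1] only arises because the empty comprehension never evaluates maps[0],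
-- while B's eager width lookup len(maps[0]) raises IndexError.
def Pre_solution (maps : List String) : Prop :=
  maps ≠ [] ∧ ∀ s ∈ maps, (maps.headD "").length ≤ s.length ∧
    ∀ j, j < (maps.headD "").length →
      (s.toList.getD j 'X') = 'X' ∨ ((s.toList.getD j 'X').isDigit = true)
instance (maps : List String) : Decidable (Pre_solution maps) := by
  unfold Pre_solution; infer_instance

def pvWitness_solution : List String := (["1X0", "X22"])

def Spec_solution (maps : List String) (out : List Int) : Prop := out = solution_alt maps
instance (maps : List String) (out : List Int) : Decidable (Spec_solution maps out) := by
  unfold Spec_solution; infer_instance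

-- ===== CLAIM (what is proved, stated in full; the proofs are below) =====
def Claim_equal_solution : Prop :=
  ∀ (maps : List String), Dom_solution maps → Pre_solution maps → Spec_solution maps (solution maps)

-- ===== LEMMAS AND PROOFS =====

def valc (g : List (List Char)) (c : Cell) : Int := dval (chAt g c.1 c.2)

def adjc (c m : Cell) : Prop :=
  m = (c.1 - 1, c.2) ∨ m = (c.1 + 1, c.2) ∨ m = (c.1, c.2 - 1) ∨ m = (c.1, c.2 + 1)

lemma mem_nbrs {c m : Cell} : m ∈ nbrs c ↔ adjc c m := by simp [nbrs, adjc]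

-- reachability from v through ok cells outside V (the start may be in V)
inductive RA (g : List (List Char)) (H W : Int) (V : Finset Cell) : Cell → Cell → Prop
  | refl (v : Cell) : RA g H W V v v
  | step {v c m : Cell} : RA g H W V v c → adjc c m → okc g H W m → m ∉ V → RA g H W V v m

lemma RA_anti {g : List (List Char)} {H W : Int} {V V' : Finset Cell} {v c : Cell}
    (hVV : V ⊆ V') (h : RA g H W V' v c) : RA g H W V v c := by
  induction h with
  | refl => exact RA.refl _
  | step _ hadj hok hnV ih => exact RA.step ih hadj hok (fun hc => hnV (hVV hc))

lemma RA_trans {g : List (List Char)} {H W : Int} {V : Finset Cell} {v m c : Cell}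
    (h1 : RA g H W V v m) (h2 : RA g H W V m c) : RA g H W V v c := by
  induction h2 with
  | refl => exact h1
  | step _ hadj hok hnV ih => exact RA.step ih hadj hok hnV

lemma RA_last {g : List (List Char)} {H W : Int} {V : Finset Cell} {v c : Cell}
    (h : RA g H W V v c) : c = v ∨ c ∉ V := by
  cases h with
  | refl => exact Or.inl rfl
  | step _ _ _ hnV => exact Or.inr hnV

-- the characterisation both traversals satisfy: V ⊆ S, S ⊆ V ∪ reachable, closed under neighbours
def GoodSet (g : List (List Char)) (H W : Int) (V S : Finset Cell) (v : Cell) : Prop :=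
  V ⊆ S ∧ (∀ c ∈ S, c ∈ V ∨ RA g H W V v c) ∧
  (∀ c, (c = v ∨ (c ∈ S ∧ c ∉ V)) → ∀ m, adjc c m → okc g H W m → m ∈ S)

lemma RA_mem_good {g : List (List Char)} {H W : Int} {V S : Finset Cell} {v c : Cell}
    (hG : GoodSet g H W V S v) (hv : v ∈ S) (h : RA g H W V v c) : c ∈ S := by
  induction h with
  | refl => exact hv
  | step hRA hadj hok hnV ih =>
    refine hG.2.2 _ ?_ _ hadj hok
    rcases RA_last hRA with h | h
    · exact Or.inl h
    · exact Or.inr ⟨ih, h⟩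

lemma good_unique {g : List (List Char)} {H W : Int} {V S1 S2 : Finset Cell} {v : Cell}
    (hv : v ∈ V) (h1 : GoodSet g H W V S1 v) (h2 : GoodSet g H W V S2 v) : S1 = S2 := by
  have key : ∀ A B : Finset Cell, GoodSet g H W V A v → GoodSet g H W V B v → A ⊆ B := by
    intro A B hA hB c hc
    rcases hA.2.1 c hc with h | h
    · exact hB.1 h
    · exact RA_mem_good hB (hB.1 hv) h
  exact Finset.Subset.antisymm (key _ _ h1 h2) (key _ _ h2 h1)

lemma dfsNbrs_spec : ∀ (N : ℕ) (g : List (List Char)) (H W : Int) (v : Cell) (ns : List Cell)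
    (vis : Finset Cell) (a : Int),
    (cellsF H W \ vis).card ≤ N → okc g H W v → v ∈ vis → (∀ m ∈ ns, adjc v m) →
    vis ⊆ (dfsNbrs g H W v ns vis a).2 ∧
    (dfsNbrs g H W v ns vis a).1 = a + ((dfsNbrs g H W v ns vis a).2 \ vis).sum (valc g) ∧
    (∀ c ∈ (dfsNbrs g H W v ns vis a).2, c ∈ vis ∨ RA g H W vis v c) ∧
    (∀ c ∈ (dfsNbrs g H W v ns vis a).2, c ∉ vis →
      ∀ m, adjc c m → okc g H W m → m ∈ (dfsNbrs g H W v ns vis a).2) ∧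
    (∀ m ∈ ns, okc g H W m → m ∈ (dfsNbrs g H W v ns vis a).2) := by
  intro N
  induction N using Nat.strong_induction_on with
  | _ N IHN =>
  intro g H W v ns
  induction ns with
  | nil =>
    intro vis a hN hok hv hns
    have h0 : dfsNbrs g H W v [] vis a = (a, vis) := by rw [dfsNbrs]
    rw [h0]
    exact ⟨Finset.Subset.refl _, by simp, fun c hc => Or.inl hc,
      fun c hc hcv => absurd hc hcv, by simp⟩
  | cons n rest IHns =>
    intro vis a hN hok hv hns
    by_cases h : okc g H W n ∧ n ∉ vis
    · have heq : dfsNbrs g H W v (n :: rest) vis a =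
          dfsNbrs g H W v rest (insert n vis ∪ (dfsA g H W n (insert n vis)).2)
            (a + (dfsA g H W n (insert n vis)).1) := by
        rw [dfsNbrs]
        rw [dif_pos h]
      have hAeq : dfsA g H W n (insert n vis) =
          dfsNbrs g H W n (nbrs n) (insert n vis) (dval (chAt g n.1 n.2)) := by
        rw [dfsA]
      have hcard : (cellsF H W \ insert n vis).card < N :=
        lt_of_lt_of_le (card_sdiff_lt (Finset.Subset.refl vis) (okc_mem_cellsF h.1) h.2) hN
      obtain ⟨A1, A2, A3, A4, A5⟩ := hAeq ▸ (IHN _ hcard g H W n (nbrs n) (insert n vis)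
        (dval (chAt g n.1 n.2)) le_rfl h.1 (Finset.mem_insert_self n vis)
        (fun m hm => mem_nbrs.mp hm))
      have hvr : vis ⊆ (dfsA g H W n (insert n vis)).2 :=
        Finset.Subset.trans (Finset.subset_insert _ _) A1
      have hu : insert n vis ∪ (dfsA g H W n (insert n vis)).2 =
          (dfsA g H W n (insert n vis)).2 := Finset.union_eq_right.mpr A1
      rw [hu] at heq
      have hcard' : (cellsF H W \ (dfsA g H W n (insert n vis)).2).card ≤ N :=
        le_trans (Finset.card_le_card
          (Finset.sdiff_subset_sdiff (Finset.Subset.refl _) hvr)) hN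
      obtain ⟨L1, L2, L3, L4, L5⟩ := IHns (dfsA g H W n (insert n vis)).2
        (a + (dfsA g H W n (insert n vis)).1) hcard' hok (hvr hv)
        (fun m hm => hns m (List.mem_cons_of_mem _ hm))
      rw [heq]
      have hRAn : RA g H W vis v n :=
        RA.step (RA.refl v) (hns n List.mem_cons_self) h.1 h.2
      refine ⟨Finset.Subset.trans hvr L1, ?_, ?_, ?_, ?_⟩
      · -- sums
        rw [L2]
        have hsubS : (dfsA g H W n (insert n vis)).2 ⊆
            (dfsNbrs g H W v rest (dfsA g H W n (insert n vis)).2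
              (a + (dfsA g H W n (insert n vis)).1)).2 := L1
        have e1 := Finset.sum_sdiff_eq_sub (f := valc g) (Finset.Subset.trans hvr L1)
        have e2 := Finset.sum_sdiff_eq_sub (f := valc g) hsubS
        have e3 := Finset.sum_sdiff_eq_sub (f := valc g) A1
        have e4 : (insert n vis).sum (valc g) = valc g n + vis.sum (valc g) :=
          Finset.sum_insert h.2
        have hvc : dval (chAt g n.1 n.2) = valc g n := rfl
        linarith [A2, e1, e2, e3, e4, hvc]
      · -- reachability
        intro c hc
        rcases L3 c hc with hcr | hRA
        · rcases A3 c hcr with hcv | hRA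
          · rcases Finset.mem_insert.mp hcv with rfl | hcv
            · exact Or.inr hRAn
            · exact Or.inl hcv
          · exact Or.inr (RA_trans hRAn (RA_anti (Finset.subset_insert _ _) hRA))
        · exact Or.inr (RA_anti hvr hRA)
      · -- closure of new cells
        intro c hc hcv m hadj hok'
        by_cases hcr : c ∈ (dfsA g H W n (insert n vis)).2
        · by_cases hcn : c = n
          · subst hcn
            exact L1 (A5 m (mem_nbrs.mpr hadj) hok')
          · have : c ∉ insert n vis := by
              simp only [Finset.mem_insert]
              tauto
            exact L1 (A4 c hcr this m hadj hok')
        · exact L4 c hc hcr m hadj hok'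
      · -- listed neighbours
        intro m hm hok'
        rcases List.mem_cons.mp hm with rfl | hm
        · exact L1 (A1 (Finset.mem_insert_self _ _))
        · exact L5 m hm hok'
    · have heq : dfsNbrs g H W v (n :: rest) vis a = dfsNbrs g H W v rest vis a := by
        rw [dfsNbrs]
        rw [dif_neg h]
      obtain ⟨L1, L2, L3, L4, L5⟩ := IHns vis a hN hok hv
        (fun m hm => hns m (List.mem_cons_of_mem _ hm))
      rw [heq]
      refine ⟨L1, L2, L3, L4, ?_⟩
      intro m hm hok'
      rcases List.mem_cons.mp hm with rfl | hm
      · have : m ∈ vis := by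
          by_contra hnv
          exact h ⟨hok', hnv⟩
        exact L1 this
      · exact L5 m hm hok'

lemma dfsA_spec (N : ℕ) (g : List (List Char)) (H W : Int) (v : Cell) (vis : Finset Cell)
    (hN : (cellsF H W \ vis).card ≤ N) (hok : okc g H W v) (hv : v ∈ vis) :
    GoodSet g H W vis (dfsA g H W v vis).2 v ∧
    (dfsA g H W v vis).1 = valc g v + ((dfsA g H W v vis).2 \ vis).sum (valc g) := by
  have hAeq : dfsA g H W v vis = dfsNbrs g H W v (nbrs v) vis (dval (chAt g v.1 v.2)) := by
    rw [dfsA]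
  obtain ⟨L1, L2, L3, L4, L5⟩ := hAeq ▸ dfsNbrs_spec N g H W v (nbrs v) vis
    (dval (chAt g v.1 v.2)) hN hok hv (fun m hm => mem_nbrs.mp hm)
  refine ⟨⟨L1, L3, ?_⟩, L2⟩
  intro c hc m hadj hok'
  rcases hc with rfl | ⟨hcS, hcv⟩
  · exact L5 m (mem_nbrs.mpr hadj) hok'
  · exact L4 c hcS hcv m hadj hok'

lemma pushN_spec (g : List (List Char)) (H W : Int) :
    ∀ (ns : List Cell) (s : List Cell) (vis : Finset Cell), ∃ P : List Cell,
      (pushN g H W ns (s, vis)).1 = P ++ s ∧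
      (pushN g H W ns (s, vis)).2 = vis ∪ P.toFinset ∧ P.Nodup ∧
      (∀ p ∈ P, okc g H W p ∧ p ∈ ns ∧ p ∉ vis) ∧
      (∀ m ∈ ns, okc g H W m → m ∈ (pushN g H W ns (s, vis)).2) := by
  intro ns
  induction ns with
  | nil =>
    intro s vis
    exact ⟨[], rfl, by simp [pushN], List.nodup_nil, by simp, by simp⟩
  | cons m rest ih =>
    intro s vis
    by_cases h : okc g H W m ∧ m ∉ vis
    · have hstep : pushN g H W (m :: rest) (s, vis) = pushN g H W rest (m :: s, insert m vis) := by
        simp only [pushN, List.foldl_cons, if_pos h]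
      obtain ⟨P', h1, h2, h3, h4, h5⟩ := ih (m :: s) (insert m vis)
      refine ⟨P' ++ [m], ?_, ?_, ?_, ?_, ?_⟩
      · rw [hstep, h1]; simp
      · rw [hstep, h2]
        ext x
        simp only [Finset.mem_union, Finset.mem_insert, List.toFinset_append, List.mem_toFinset,
          List.toFinset_cons, List.toFinset_nil, insert_empty_eq, Finset.mem_singleton]
        tauto
      · refine List.Nodup.append h3 (List.nodup_singleton m) ?_
        intro p hp hpm
        simp only [List.mem_singleton] at hpm
        subst hpm
        exact (h4 p hp).2.2 (Finset.mem_insert_self _ _)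
      · intro p hp
        rcases List.mem_append.mp hp with hp | hp
        · obtain ⟨hok, hmem, hnv⟩ := h4 p hp
          exact ⟨hok, List.mem_cons_of_mem _ hmem, fun hv => hnv (Finset.mem_insert_of_mem hv)⟩
        · simp only [List.mem_singleton] at hp
          subst hp
          exact ⟨h.1, List.mem_cons_self, h.2⟩
      · intro m' hm' hok'
        rcases List.mem_cons.mp hm' with hm' | hm'
        · subst hm'
          rw [hstep, h2]
          exact Finset.mem_union_left _ (Finset.mem_insert_self _ _)
        · rw [hstep]; exact h5 m' hm' hok'
    · have hstep : pushN g H W (m :: rest) (s, vis) = pushN g H W rest (s, vis) := by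
        simp only [pushN, List.foldl_cons, if_neg h]
      obtain ⟨P', h1, h2, h3, h4, h5⟩ := ih s vis
      refine ⟨P', by rw [hstep, h1], by rw [hstep, h2], h3,
        fun p hp => ⟨(h4 p hp).1, List.mem_cons_of_mem _ (h4 p hp).2.1, (h4 p hp).2.2⟩, ?_⟩
      intro m' hm' hok'
      rcases List.mem_cons.mp hm' with hm' | hm'
      · subst hm'
        have hmv : m' ∈ vis := by
          by_contra hnv
          exact h ⟨hok', hnv⟩
        rw [hstep, h2]
        exact Finset.mem_union_left _ hmv
      · rw [hstep]; exact h5 m' hm' hok'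

lemma loopB_spec : ∀ (N : ℕ) (g : List (List Char)) (H W : Int) (stack : List Cell)
    (vis : Finset Cell) (a : Int),
    (cellsF H W \ vis).card + stack.length ≤ N → stack.Nodup →
    (∀ s ∈ stack, okc g H W s ∧ s ∈ vis) →
    vis ⊆ (loopB g H W stack vis a).2 ∧
    (loopB g H W stack vis a).1 =
      a + stack.toFinset.sum (valc g) + ((loopB g H W stack vis a).2 \ vis).sum (valc g) ∧
    (∀ c ∈ (loopB g H W stack vis a).2, c ∈ vis ∨ ∃ s ∈ stack, RA g H W vis s c) ∧
    (∀ c ∈ (loopB g H W stack vis a).2, c ∉ vis →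
      ∀ m, adjc c m → okc g H W m → m ∈ (loopB g H W stack vis a).2) ∧
    (∀ c ∈ stack, ∀ m, adjc c m → okc g H W m → m ∈ (loopB g H W stack vis a).2) := by
  intro N
  induction N using Nat.strong_induction_on with
  | _ N IH =>
  intro g H W stack vis a hN hnd hst
  match stack with
  | [] =>
    have h0 : loopB g H W [] vis a = (a, vis) := by rw [loopB]
    rw [h0]
    exact ⟨Finset.Subset.refl _, by simp, fun c hc => Or.inl hc,
      fun c hc hcv => absurd hc hcv, by simp⟩
  | c :: rest =>
    obtain ⟨P, hP1, hP2, hPnd, hPmem, hPcl⟩ := pushN_spec g H W (nbrs c) rest vis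
    have heq : loopB g H W (c :: rest) vis a =
        loopB g H W (pushN g H W (nbrs c) (rest, vis)).1 (pushN g H W (nbrs c) (rest, vis)).2
          (a + dval (chAt g c.1 c.2)) := by
      rw [loopB]
    have hcv : okc g H W c ∧ c ∈ vis := hst c List.mem_cons_self
    have hrest : ∀ s ∈ rest, okc g H W s ∧ s ∈ vis := fun s hs => hst s (List.mem_cons_of_mem _ hs)
    have hcnr : c ∉ rest := (List.nodup_cons.mp hnd).1
    have hrnd : rest.Nodup := (List.nodup_cons.mp hnd).2
    have hPvis : ∀ p ∈ P, p ∉ vis := fun p hp => (hPmem p hp).2.2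
    have hPrest : ∀ p ∈ P, p ∉ rest := fun p hp hpr => hPvis p hp (hrest p hpr).2
    have hvp : vis ⊆ (pushN g H W (nbrs c) (rest, vis)).2 := by
      rw [hP2]; exact Finset.subset_union_left
    have hmeas : (cellsF H W \ (pushN g H W (nbrs c) (rest, vis)).2).card +
        (pushN g H W (nbrs c) (rest, vis)).1.length <
        N := by
      have := pushN_card g H W (nbrs c) (rest, vis)
      simp only [List.length_cons] at hN
      simp only at this
      omega
    have hnd' : (pushN g H W (nbrs c) (rest, vis)).1.Nodup := by
      rw [hP1]
      exact List.Nodup.append hPnd hrnd (fun p hp hpr => hPrest p hp hpr)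
    have hst' : ∀ s ∈ (pushN g H W (nbrs c) (rest, vis)).1,
        okc g H W s ∧ s ∈ (pushN g H W (nbrs c) (rest, vis)).2 := by
      intro s hs
      rw [hP1] at hs
      rcases List.mem_append.mp hs with hs | hs
      · exact ⟨(hPmem s hs).1, by rw [hP2]; exact Finset.mem_union_right _ (List.mem_toFinset.mpr hs)⟩
      · exact ⟨(hrest s hs).1, hvp (hrest s hs).2⟩
    obtain ⟨L1, L2, L3, L4, L5⟩ := IH _ hmeas g H W (pushN g H W (nbrs c) (rest, vis)).1
      (pushN g H W (nbrs c) (rest, vis)).2 (a + dval (chAt g c.1 c.2)) le_rfl hnd' hst'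
    rw [heq]
    have hPadj : ∀ p ∈ P, RA g H W vis c p := fun p hp =>
      RA.step (RA.refl c) (mem_nbrs.mp (hPmem p hp).2.1) (hPmem p hp).1 (hPvis p hp)
    have hsub2 : (pushN g H W (nbrs c) (rest, vis)).2 ⊆ (loopB g H W
        (pushN g H W (nbrs c) (rest, vis)).1 (pushN g H W (nbrs c) (rest, vis)).2
        (a + dval (chAt g c.1 c.2))).2 := L1
    refine ⟨Finset.Subset.trans hvp L1, ?_, ?_, ?_, ?_⟩
    · -- sums
      rw [L2]
      have hd1 : Disjoint P.toFinset rest.toFinset := by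
        rw [Finset.disjoint_left]
        intro p hp
        simp only [List.mem_toFinset] at *
        exact hPrest p hp
      have hd2 : Disjoint vis P.toFinset := by
        rw [Finset.disjoint_right]
        intro p hp
        simp only [List.mem_toFinset] at hp
        exact hPvis p hp
      have e1 : (pushN g H W (nbrs c) (rest, vis)).1.toFinset.sum (valc g) =
          P.toFinset.sum (valc g) + rest.toFinset.sum (valc g) := by
        rw [hP1, List.toFinset_append, Finset.sum_union hd1]
      have e2 : (c :: rest).toFinset.sum (valc g) = valc g c + rest.toFinset.sum (valc g) := by
        rw [List.toFinset_cons, Finset.sum_insert (by simpa using hcnr)]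
      have hsub3 : vis ⊆ (loopB g H W (pushN g H W (nbrs c) (rest, vis)).1
          (pushN g H W (nbrs c) (rest, vis)).2 (a + dval (chAt g c.1 c.2))).2 :=
        Finset.Subset.trans hvp L1
      have e3 := Finset.sum_sdiff_eq_sub (f := valc g) hsub3
      have e4 := Finset.sum_sdiff_eq_sub (f := valc g) hsub2
      have e5 : (pushN g H W (nbrs c) (rest, vis)).2.sum (valc g) =
          vis.sum (valc g) + P.toFinset.sum (valc g) := by
        rw [hP2, Finset.sum_union hd2]
      have hvc : dval (chAt g c.1 c.2) = valc g c := rfl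
      rw [e1, e2, e3, e4, e5, hvc]
      ring
    · -- reachability
      intro c' hc'
      rcases L3 c' hc' with h | ⟨s, hs, hRA⟩
      · rw [hP2] at h
        rcases Finset.mem_union.mp h with h | h
        · exact Or.inl h
        · exact Or.inr ⟨c, List.mem_cons_self, hPadj c' (List.mem_toFinset.mp h)⟩
      · have hRA' : RA g H W vis s c' := RA_anti hvp hRA
        rw [hP1] at hs
        rcases List.mem_append.mp hs with hs | hs
        · exact Or.inr ⟨c, List.mem_cons_self, RA_trans (hPadj s hs) hRA'⟩
        · exact Or.inr ⟨s, List.mem_cons_of_mem _ hs, hRA'⟩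
    · -- closure of new cells
      intro c' hc' hc'v m hadj hok'
      by_cases hcp : c' ∈ (pushN g H W (nbrs c) (rest, vis)).2
      · have : c' ∈ P := by
          rw [hP2] at hcp
          rcases Finset.mem_union.mp hcp with h | h
          · exact absurd h hc'v
          · exact List.mem_toFinset.mp h
        exact L5 c' (by rw [hP1]; exact List.mem_append.mpr (Or.inl this)) m hadj hok'
      · exact L4 c' hc' hcp m hadj hok'
    · -- closure of stack cells
      intro c' hc' m hadj hok'
      rcases List.mem_cons.mp hc' with hc' | hc'
      · subst hc'
        exact L1 (hPcl m (mem_nbrs.mpr hadj) hok')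
      · exact L5 c' (by rw [hP1]; exact List.mem_append.mpr (Or.inr hc')) m hadj hok'

lemma seed_eq (g : List (List Char)) (H W : Int) (c : Cell) (V : Finset Cell)
    (hok : okc g H W c) :
    dfsA g H W c (insert c V) = loopB g H W [c] (insert c V) 0 := by
  have hcv : c ∈ insert c V := Finset.mem_insert_self c V
  obtain ⟨hGA, hA2⟩ := dfsA_spec ((cellsF H W \ insert c V).card) g H W c (insert c V)
    le_rfl hok hcv
  obtain ⟨B1, B2, B3, B4, B5⟩ := loopB_spec ((cellsF H W \ insert c V).card + 1) g H W [c]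
    (insert c V) 0 (by simp) (List.nodup_singleton c)
    (by intro s hs; simp only [List.mem_singleton] at hs; subst hs; exact ⟨hok, hcv⟩)
  have hGB : GoodSet g H W (insert c V) (loopB g H W [c] (insert c V) 0).2 c := by
    refine ⟨B1, ?_, ?_⟩
    · intro c' hc'
      rcases B3 c' hc' with h | ⟨s, hs, hRA⟩
      · exact Or.inl h
      · simp only [List.mem_singleton] at hs
        subst hs
        exact Or.inr hRA
    · intro c' hc' m hadj hok'
      rcases hc' with rfl | ⟨hcS, hcvn⟩
      · exact B5 c' List.mem_cons_self m hadj hok'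
      · exact B4 c' hcS hcvn m hadj hok'
  have hSS : (dfsA g H W c (insert c V)).2 = (loopB g H W [c] (insert c V) 0).2 :=
    good_unique hcv hGA hGB
  have hfst : (dfsA g H W c (insert c V)).1 = (loopB g H W [c] (insert c V) 0).1 := by
    rw [hA2, B2, hSS]
    simp [valc]
  exact Prod.ext_iff.mpr ⟨hfst, hSS⟩

lemma step_eq (g : List (List Char)) (H W : Int) (st : List Int × Finset Cell) (c : Cell)
    (hb : 0 ≤ c.1 ∧ c.1 < H ∧ 0 ≤ c.2 ∧ c.2 < W) :
    stepA g H W st c = stepB g H W st c := by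
  unfold stepA stepB
  by_cases hg : chAt g c.1 c.2 ≠ 'X' ∧ c ∉ st.2
  · rw [if_pos hg, if_pos hg, seed_eq g H W c st.2 ⟨hb.1, hb.2.1, hb.2.2.1, hb.2.2.2, hg.1⟩]
  · rw [if_neg hg, if_neg hg]

lemma nested_eq_flat {σ : Type} (l : List ℕ) (w : ℕ) (f : σ → Cell → σ) (init : σ) :
    l.foldl (fun st i => (List.range w).foldl (fun st2 j => f st2 (cellOf i j)) st) init
      = (l.flatMap (fun i => (List.range w).map (fun j => cellOf i j))).foldl f init := by
  induction l generalizing init with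
  | nil => rfl
  | cons i rest ih =>
    simp only [List.foldl_cons, List.flatMap_cons, List.foldl_append, List.foldl_map]
    exact ih _

-- ===== VERDICT (by name: the statement is the Claim_ definition above) =====
theorem solution_spec : Claim_equal_solution := by
  unfold Claim_equal_solution
  intro maps _ _
  unfold Spec_solution
  simp only [solution, solution_alt]
  rw [nested_eq_flat]
  have key : ∀ (l : List Cell) (init : List Int × Finset Cell),
      (∀ c ∈ l, 0 ≤ c.1 ∧ c.1 < (maps.length : Int) ∧ 0 ≤ c.2 ∧ c.2 < ((maps.headD "").length : Int)) →
      l.foldl (stepA (maps.map String.toList) (maps.length : Int) ((maps.headD "").length : Int)) init =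
      l.foldl (fun st c => stepB (maps.map String.toList) (maps.length : Int) ((maps.headD "").length : Int) st c) init := by
    intro l init hl
    induction l generalizing init with
    | nil => rfl
    | cons c rest ih =>
      simp only [List.foldl_cons]
      rw [step_eq _ _ _ _ _ (hl c (List.mem_cons_self))]
      exact ih _ (fun x hx => hl x (List.mem_cons_of_mem _ hx))
  rw [key]
  intro c hc
  simp only [List.mem_flatMap, List.mem_map, List.mem_range] at hc
  obtain ⟨i, hi, j, hj, rfl⟩ := hc
  simp only [cellOf]
  refine ⟨by positivity, by exact_mod_cast hi, by positivity, by exact_mod_cast hj⟩
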